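-- pv_equiv track=rewrite | github.com/pptthu/BE | src/utils/validators.py | is_valid_full_name
-- ===== SOURCE A (Python) =====
-- def is_valid_full_name(name: str) -> bool:
--     """
--     Yêu cầu:
--     - Có ít nhất 2 từ (họ + tên), cách nhau bằng khoảng trắng
--     - Chỉ chứa chữ cái (kể cả tiếng Việt có dấu), khoảng trắng, gạch nối, dấu '
--     """
--     if not isinstance(name, str):
--         return False
--     s = " ".join(name.split())  # chuẩn hoá khoảng trắng
--     if len(s) < 3:
--         return False
--     parts = s.split(" ")
--     if len(parts) < 2:
--         return False
--
--     ALLOWED = set(" -'’")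
--     # Tất cả ký tự phải là chữ cái unicode hoặc ký tự cho phép
--     if any(not (ch.isalpha() or ch in ALLOWED) for ch in s):
--         return False
--
--     # Mỗi phần phải có ít nhất 1 ký tự chữ cái
--     if any(not any(c.isalpha() for c in p) for p in parts):
--         return False
--
--     return True
-- ===== SOURCE B (Python) =====
-- def is_valid_full_name(name: str) -> bool:
--     if not isinstance(name, str):
--         return False
--     s = " ".join(name.split())
--     if len(s) < 3 or " " not in s:
--         return False
--     seen = False  # current word has a letter
--     for ch in s:
--         if ch == " ":
--             if not seen:
--                 return False
--             seen = False
--         elif ch.isalpha():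
--             seen = True
--         elif ch not in "-'’":
--             return False
--     return seen
-- ===== Notes on version B (the rewrite author's own statement) =====
-- stated objective: simpler
-- what changed: Replaces the split-on-space pass plus the two any()-comprehension scans (whole-string allowed-char scan and per-part letter scan) by a single fused left-to-right scan over the normalized string that validates each character inline and checks at every word boundary that the finished word contained a letter; the word-count guard becomes a single space-membership test.
import Mathlib
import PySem

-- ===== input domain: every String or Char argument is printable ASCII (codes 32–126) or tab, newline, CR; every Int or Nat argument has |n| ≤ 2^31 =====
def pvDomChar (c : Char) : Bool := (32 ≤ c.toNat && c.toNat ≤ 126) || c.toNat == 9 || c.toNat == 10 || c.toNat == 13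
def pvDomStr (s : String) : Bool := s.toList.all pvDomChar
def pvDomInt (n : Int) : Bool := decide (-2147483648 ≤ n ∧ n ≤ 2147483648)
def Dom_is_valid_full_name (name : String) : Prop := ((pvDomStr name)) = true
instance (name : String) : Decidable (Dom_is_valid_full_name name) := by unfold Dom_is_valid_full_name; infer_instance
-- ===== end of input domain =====

-- B fuses A's split(" ") pass and its two any()-scans into one left-to-right scan with a
-- per-word "has a letter" flag (objective: simpler, one fused pass instead of several).

-- ===== PORT A =====
-- ALLOWED = set(" -'’")
def pvAllowed : PySem.Set Char := PySem.Set.ofList " -'’".toList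

def is_valid_full_name (name : String) : Bool :=
  -- `if not isinstance(name, str)` is never taken: the argument is a str
  let s := PySem.Chars.join " ".toList (PySem.Chars.split₀ name.toList)
  if s.length < 3 then false
  else
    let parts := PySem.Chars.splitOn s " ".toList
    if parts.length < 2 then false
    else if s.any (fun ch => !(PySem.Chars.isalpha ch || decide (ch ∈ pvAllowed))) then false
    else if parts.any (fun p => !(p.any fun c => PySem.Chars.isalpha c)) then false
    else true

-- ===== PORT B =====
-- the for-loop of Source B: `seen` = current word has seen a letter; early `return False` = `false`
def pvScan : List Char → Bool → Bool
  | [], seen => seen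
  | c :: rest, seen =>
    if c = ' ' then
      if !seen then false else pvScan rest false
    else if PySem.Chars.isalpha c then pvScan rest true
    else if !(PySem.Chars.isIn [c] "-'’".toList) then false
    else pvScan rest seen

def is_valid_full_name_alt (name : String) : Bool :=
  let s := PySem.Chars.join " ".toList (PySem.Chars.split₀ name.toList)
  if s.length < 3 || !(PySem.Chars.isIn " ".toList s) then false
  else pvScan s false

-- ===== PRECONDITION & SPEC =====
def Spec_is_valid_full_name (name : String) (out : Bool) : Prop := out = is_valid_full_name_alt name
instance (name : String) (out : Bool) : Decidable (Spec_is_valid_full_name name out) := by unfold Spec_is_valid_full_name; infer_instance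

-- ===== CLAIM (what is proved, stated in full; the proofs are below) =====
def Claim_equal_is_valid_full_name : Prop := ∀ (name : String), Dom_is_valid_full_name name → Spec_is_valid_full_name name (is_valid_full_name name)

-- ===== LEMMAS AND PROOFS =====

-- characters A accepts inside a word (everything of ALLOWED except the space)
def pvOk (c : Char) : Bool := PySem.Chars.isalpha c || decide (c ∈ (['-', '\'', '’'] : List Char))

-- fuel-free reformulation of PySem.Chars.splitOn.go for the separator " "
def pvSplit : List Char → List Char → List (List Char) → List (List Char)
  | [], cur, acc => (cur.reverse :: acc).reverse
  | c :: rest, cur, acc =>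
    if c = ' ' then pvSplit rest [] (cur.reverse :: acc)
    else pvSplit rest (c :: cur) acc

theorem go_eq_pvSplit (l : List Char) : ∀ (fuel : Nat) (cur : List Char) (acc : List (List Char)),
    l.length < fuel →
    PySem.Chars.splitOn.go [' '] fuel l cur acc = pvSplit l cur acc := by
  induction l with
  | nil =>
    intro fuel cur acc h
    cases fuel with
    | zero => simp at h
    | succ f => rw [PySem.Chars.splitOn.go.eq_def]; rfl
  | cons c rest ih =>
    intro fuel cur acc h
    cases fuel with
    | zero => simp at h
    | succ f =>
      have hlen : rest.length < f := by simp only [List.length_cons] at h; omega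
      rw [PySem.Chars.splitOn.go.eq_def]
      by_cases hc : c = ' '
      · subst hc
        simp [List.isPrefixOf, pvSplit, ih f [] (cur.reverse :: acc) hlen]
      · have hc' : (' ' == c) = false := by
          simp only [beq_eq_false_iff_ne]; exact fun h' => hc h'.symm
        simp [List.isPrefixOf, hc', hc, pvSplit, ih f (c :: cur) acc hlen]

theorem pvSplit_word (w : List Char) : ∀ (l cur : List Char) (acc : List (List Char)),
    (∀ c ∈ w, c ≠ ' ') → pvSplit (w ++ l) cur acc = pvSplit l (w.reverse ++ cur) acc := by
  induction w with
  | nil => intro l cur acc _; simp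
  | cons c w' ih =>
    intro l cur acc h
    have hc : c ≠ ' ' := h c (by simp)
    simp only [List.cons_append, pvSplit, hc, if_false]
    rw [ih l (c :: cur) acc (fun d hd => h d (by simp [hd]))]
    simp

theorem pvSplit_join (L : List (List Char)) : ∀ (acc : List (List Char)),
    (∀ w ∈ L, ∀ c ∈ w, c ≠ ' ') → L ≠ [] →
    pvSplit (PySem.Chars.join [' '] L) [] acc = acc.reverse ++ L := by
  induction L with
  | nil => intro acc _ hne; exact absurd rfl hne
  | cons w L' ih =>
    intro acc h _
    have hw : ∀ c ∈ w, c ≠ ' ' := h w (by simp)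
    cases L' with
    | nil =>
      have hword := pvSplit_word w [] [] acc hw
      rw [List.append_nil] at hword
      rw [PySem.Chars.join_singleton, hword]
      simp [pvSplit]
    | cons y r =>
      rw [PySem.Chars.join_cons_cons, List.append_assoc, pvSplit_word w _ [] acc hw]
      simp only [List.singleton_append, List.append_nil, pvSplit, if_pos]
      rw [List.reverse_reverse]
      rw [ih (w :: acc) (fun v hv => h v (by simp [hv])) (by simp)]
      simp

theorem splitOn_join (L : List (List Char)) (h : ∀ w ∈ L, ∀ c ∈ w, c ≠ ' ') (hne : L ≠ []) :
    PySem.Chars.splitOn (PySem.Chars.join [' '] L) [' '] = L := by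
  unfold PySem.Chars.splitOn
  rw [go_eq_pvSplit _ _ _ _ (by omega), pvSplit_join L [] h hne]
  simp

theorem mem_space_join (L : List (List Char)) (h : ∀ w ∈ L, ∀ c ∈ w, c ≠ ' ') :
    ' ' ∈ PySem.Chars.join [' '] L ↔ 2 ≤ L.length := by
  cases L with
  | nil => simp [PySem.Chars.join_nil]
  | cons w L' =>
    cases L' with
    | nil =>
      simp only [PySem.Chars.join_singleton, List.length_cons, List.length_nil]
      constructor
      · intro hm; exact absurd rfl (h w (by simp) ' ' hm)
      · intro h2; exact absurd h2 (by omega)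
    | cons y r =>
      rw [PySem.Chars.join_cons_cons]
      simp

theorem any_join (L : List (List Char)) (p : Char → Bool) (hp : p ' ' = false) :
    (PySem.Chars.join [' '] L).any p = L.any (fun w => w.any p) := by
  induction L with
  | nil => simp [PySem.Chars.join_nil]
  | cons w L' ih =>
    cases L' with
    | nil => simp [PySem.Chars.join_singleton]
    | cons y r =>
      rw [PySem.Chars.join_cons_cons]
      simp [List.any_append, hp, ih]

theorem isIn_singleton (c : Char) (l : List Char) :
    PySem.Chars.isIn [c] l = decide (c ∈ l) := by
  by_cases hm : c ∈ l
  · simp [hm, (PySem.Chars.isIn_iff_infix [c] l).mpr ((List.singleton_infix_iff c l).mpr hm)]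
  · cases hh : PySem.Chars.isIn [c] l with
    | false => simp [hm]
    | true =>
      exact absurd ((List.singleton_infix_iff c l).mp ((PySem.Chars.isIn_iff_infix [c] l).mp hh)) hm

theorem pvScan_word (w : List Char) : ∀ (rest : List Char) (seen : Bool),
    (∀ c ∈ w, c ≠ ' ') →
    pvScan (w ++ rest) seen =
      if w.all pvOk then pvScan rest (seen || w.any (fun c => PySem.Chars.isalpha c)) else false := by
  induction w with
  | nil => intro rest seen _; simp
  | cons c w' ih =>
    intro rest seen h
    have hc : c ≠ ' ' := h c (by simp)
    have ih' := fun sn => ih rest sn (fun d hd => h d (by simp [hd]))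
    have htl : ("-'’".toList : List Char) = ['-', '\'', '’'] := by decide
    simp only [List.cons_append, pvScan, hc, if_false, isIn_singleton, htl]
    by_cases ha : PySem.Chars.isalpha c = true
    · simp [ha, ih', pvOk, List.all_cons, List.any_cons]
    · by_cases hin : c ∈ (['-', '\'', '’'] : List Char)
      · simp [ha, hin, ih', pvOk, List.all_cons, List.any_cons]
      · simp [ha, hin, pvOk, List.all_cons]

theorem pvScan_join (L : List (List Char)) (h : ∀ w ∈ L, ∀ c ∈ w, c ≠ ' ') (hne : L ≠ []) :
    pvScan (PySem.Chars.join [' '] L) false =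
      (L.all (fun w => w.all pvOk) && L.all (fun w => w.any (fun c => PySem.Chars.isalpha c))) := by
  induction L with
  | nil => exact absurd rfl hne
  | cons w L' ih =>
    have hw : ∀ c ∈ w, c ≠ ' ' := h w (by simp)
    cases L' with
    | nil =>
      have hword := pvScan_word w [] false hw
      rw [List.append_nil] at hword
      rw [PySem.Chars.join_singleton, hword]
      cases hx : w.all pvOk <;> simp [hx, pvScan]
    | cons y r =>
      have ih' := ih (fun v hv => h v (by simp [hv])) (by simp)
      rw [PySem.Chars.join_cons_cons, List.append_assoc,
        pvScan_word w _ false hw]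
      simp only [List.singleton_append, Bool.false_or]
      by_cases hx : w.all pvOk
      · by_cases hy : w.any (fun c => PySem.Chars.isalpha c)
        · simp [hx, hy, pvScan, ih', Bool.and_assoc, Bool.and_left_comm]
        · simp [hx, hy, pvScan]
      · simp [hx]

theorem split₀_go_nospace (s : List Char) : ∀ (cur : List Char) (acc : List (List Char)),
    (∀ c ∈ cur, PySem.Chars.isspace c = false) →
    (∀ w ∈ acc, ∀ c ∈ w, PySem.Chars.isspace c = false) →
    ∀ w ∈ PySem.Chars.split₀.go s cur acc, ∀ c ∈ w, PySem.Chars.isspace c = false := by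
  induction s with
  | nil =>
    intro cur acc hcur hacc
    rw [PySem.Chars.split₀.go.eq_def]
    by_cases hemp : cur.isEmpty
    · simp only [hemp, if_true]
      intro w hw
      exact hacc w (List.mem_reverse.mp hw)
    · simp only [hemp]
      intro w hw c hc
      rcases List.mem_cons.mp (List.mem_reverse.mp hw) with rfl | hw'
      · exact hcur c (List.mem_reverse.mp hc)
      · exact hacc w hw' c hc
  | cons c rest ih =>
    intro cur acc hcur hacc
    rw [PySem.Chars.split₀.go.eq_def]
    by_cases hs : PySem.Chars.isspace c = true
    · simp only [hs, if_true]
      by_cases hemp : cur.isEmpty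
      · simp only [hemp, if_true]
        exact ih [] acc (by simp) hacc
      · simp only [hemp]
        refine ih [] (cur.reverse :: acc) (by simp) ?_
        intro w hw d hd
        rcases List.mem_cons.mp hw with rfl | hw'
        · exact hcur d (List.mem_reverse.mp hd)
        · exact hacc w hw' d hd
    · simp only [hs]
      refine ih (c :: cur) acc ?_ hacc
      intro d hd
      rcases List.mem_cons.mp hd with rfl | hd'
      · exact Bool.eq_false_iff.mpr hs
      · exact hcur d hd'

theorem split₀_nospace (s : List Char) :
    ∀ w ∈ PySem.Chars.split₀ s, ∀ c ∈ w, c ≠ ' ' := by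
  intro w hw c hc hceq
  subst hceq
  unfold PySem.Chars.split₀ at hw
  have hf := split₀_go_nospace s [] [] (by simp) (by simp) w hw ' ' hc
  exact absurd hf (by decide)

theorem bad_eq (c : Char) (hc : c ≠ ' ') :
    (!(PySem.Chars.isalpha c || decide (c ∈ pvAllowed))) = !(pvOk c) := by
  have htl : (" -'’".toList : List Char) = [' ', '-', '\'', '’'] := by decide
  have h1 : (c ∈ pvAllowed) ↔ c ∈ ([' ', '-', '\'', '’'] : List Char) := by
    rw [show pvAllowed = PySem.Set.ofList [' ', '-', '\'', '’'] from by rw [pvAllowed, htl]]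
    exact PySem.Set.mem_ofList _ _
  by_cases hmem : c ∈ (['-', '\'', '’'] : List Char)
  · have : c ∈ ([' ', '-', '\'', '’'] : List Char) := by simpa [List.mem_cons] using Or.inr hmem
    simp [pvOk, h1, hmem, this]
  · have : ¬ c ∈ ([' ', '-', '\'', '’'] : List Char) := by
      simp only [List.mem_cons] at hmem ⊢
      rintro (rfl | h') <;> [exact hc rfl; exact hmem h']
    simp [pvOk, h1, hmem, this]

theorem core_eq (L : List (List Char)) (hns : ∀ w ∈ L, ∀ c ∈ w, c ≠ ' ') :
    (if (PySem.Chars.join [' '] L).length < 3 then false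
     else if (PySem.Chars.splitOn (PySem.Chars.join [' '] L) [' ']).length < 2 then false
     else if (PySem.Chars.join [' '] L).any
         (fun ch => !(PySem.Chars.isalpha ch || decide (ch ∈ pvAllowed))) then false
     else if (PySem.Chars.splitOn (PySem.Chars.join [' '] L) [' ']).any
         (fun p => !(p.any fun c => PySem.Chars.isalpha c)) then false
     else true)
    = (if (PySem.Chars.join [' '] L).length < 3 || !(PySem.Chars.isIn [' '] (PySem.Chars.join [' '] L)) then false
       else pvScan (PySem.Chars.join [' '] L) false) := by
  rcases hL : L with _ | ⟨w, L'⟩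
  · simp [PySem.Chars.join_nil]
  · rw [← hL]
    have hne : L ≠ [] := by rw [hL]; simp
    have hlen2 : 2 ≤ L.length ↔ ¬ (PySem.Chars.splitOn (PySem.Chars.join [' '] L) [' ']).length < 2 := by
      rw [splitOn_join L hns hne]; omega
    have hin : PySem.Chars.isIn [' '] (PySem.Chars.join [' '] L) = true ↔ 2 ≤ L.length := by
      rw [PySem.Chars.isIn_iff_infix, List.singleton_infix_iff]
      exact mem_space_join L hns
    by_cases h3 : (PySem.Chars.join [' '] L).length < 3
    · simp [h3]
    · by_cases h2 : 2 ≤ L.length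
      · have hintrue : PySem.Chars.isIn [' '] (PySem.Chars.join [' '] L) = true := hin.mpr h2
        have hguard : ¬ (PySem.Chars.splitOn (PySem.Chars.join [' '] L) [' ']).length < 2 :=
          hlen2.mp h2
        rw [splitOn_join L hns hne] at hguard ⊢
        have hany1 : (PySem.Chars.join [' '] L).any
            (fun ch => !(PySem.Chars.isalpha ch || decide (ch ∈ pvAllowed)))
            = L.any (fun v => !(v.all pvOk)) := by
          rw [any_join L _ (by decide)]
          refine PySem.List.any_congr_mem ?_
          intro v hv
          calc v.any (fun c => !(PySem.Chars.isalpha c || decide (c ∈ pvAllowed)))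
              = v.any (fun c => !(pvOk c)) :=
                PySem.List.any_congr_mem (fun d hd => bad_eq d (hns v hv d hd))
            _ = !(v.all pvOk) := List.not_all_eq_any_not.symm
        have hany2 : (L.any fun p => !(p.any fun c => PySem.Chars.isalpha c))
            = !(L.all fun p => p.any fun c => PySem.Chars.isalpha c) :=
          List.not_all_eq_any_not.symm
        have hscan := pvScan_join L hns hne
        rw [hany1, hany2, hscan]
        have hnot1 : L.any (fun v => !(v.all pvOk)) = !(L.all fun v => v.all pvOk) :=
          List.not_all_eq_any_not.symm
        rw [hnot1]
        simp only [h3, hguard, hintrue, if_false, Bool.not_true, Bool.or_false]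
        cases hA : (L.all fun v => v.all pvOk) <;>
          cases hB : (L.all fun p => p.any fun c => PySem.Chars.isalpha c) <;>
            simp
      · have hinfalse : PySem.Chars.isIn [' '] (PySem.Chars.join [' '] L) = false := by
          cases hh : PySem.Chars.isIn [' '] (PySem.Chars.join [' '] L) with
          | false => rfl
          | true => exact absurd (hin.mp hh) h2
        have hguard : (PySem.Chars.splitOn (PySem.Chars.join [' '] L) [' ']).length < 2 := by
          by_contra hcon; exact h2 (hlen2.mpr hcon)
        simp [h3, hguard, hinfalse]

-- ===== VERDICT (by name: the statement is the Claim_ definition above) =====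
theorem is_valid_full_name_spec : Claim_equal_is_valid_full_name := by
  intro name _
  unfold Spec_is_valid_full_name is_valid_full_name is_valid_full_name_alt
  have hsp : (" ".toList : List Char) = [' '] := by decide
  rw [hsp]
  exact core_eq (PySem.Chars.split₀ name.toList) (split₀_nospace name.toList)
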